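-- pv_equiv track=rewrite | github.com/thedataengineer/mahabharatha | mahabharatha/rendering/status_renderer.py | format_step_progress
-- ===== SOURCE A (Python) =====
-- STEP_INDICATORS = {
--     "completed": "\u2705",
--     "in_progress": "\U0001f504",
--     "pending": "\u23f3",
--     "failed": "\u274c",
-- }
--
-- def format_step_progress(
--     current_step: int | None,
--     total_steps: int | None,
--     step_states: list[str] | None = None,
-- ) -> str | None:
--     """Format step progress as a visual indicator.
--
--     Args:
--         current_step: Current step number (1-indexed).
--         total_steps: Total number of steps.
--         step_states: List of states per step ("completed", "in_progress", "pending", "failed").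
--
--     Returns:
--         Formatted string like "[Step 3/5: checkmarks]" or None if no steps.
--     """
--     if current_step is None or total_steps is None or total_steps == 0:
--         return None
--
--     # Build emoji indicators
--     indicators = []
--     if step_states:
--         for state in step_states:
--             indicators.append(STEP_INDICATORS.get(state, "\u23f3"))
--     else:
--         # Fallback: derive states from current_step
--         for i in range(1, total_steps + 1):
--             if i < current_step:
--                 indicators.append(STEP_INDICATORS["completed"])
--             elif i == current_step:
--                 indicators.append(STEP_INDICATORS["in_progress"])
--             else:
--                 indicators.append(STEP_INDICATORS["pending"])
--
--     return f"[Step {current_step}/{total_steps}: {''.join(indicators)}]"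
-- ===== SOURCE B (Python) =====
-- STEP_INDICATORS = {
--     "completed": "\u2705",
--     "in_progress": "\U0001f504",
--     "pending": "\u23f3",
--     "failed": "\u274c",
-- }
--
--
-- def format_step_progress(current_step, total_steps, step_states=None):
--     if current_step is None or total_steps is None or total_steps == 0:
--         return None
--     if step_states:
--         indicators = [STEP_INDICATORS.get(state, "\u23f3") for state in step_states]
--     else:
--         # Closed form: counts instead of a per-index comparison loop.
--         completed = max(0, min(current_step - 1, total_steps))
--         current = 1 <= current_step <= total_steps
--         pending = total_steps - completed - (1 if current else 0)
--         indicators = (["\u2705"] * completed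
--                       + (["\U0001f504"] if current else [])
--                       + ["\u23f3"] * pending)
--     return f"[Step {current_step}/{total_steps}: {''.join(indicators)}]"
-- ===== Notes on version B (the rewrite author's own statement) =====
-- stated objective: simpler
-- what changed: The fallback branch that compared every index 1..total_steps against current_step is replaced by a closed-form list built from counts (completed-count, one optional in-progress marker, pending-count); the explicit append loop over step_states becomes a comprehension.
import Mathlib
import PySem

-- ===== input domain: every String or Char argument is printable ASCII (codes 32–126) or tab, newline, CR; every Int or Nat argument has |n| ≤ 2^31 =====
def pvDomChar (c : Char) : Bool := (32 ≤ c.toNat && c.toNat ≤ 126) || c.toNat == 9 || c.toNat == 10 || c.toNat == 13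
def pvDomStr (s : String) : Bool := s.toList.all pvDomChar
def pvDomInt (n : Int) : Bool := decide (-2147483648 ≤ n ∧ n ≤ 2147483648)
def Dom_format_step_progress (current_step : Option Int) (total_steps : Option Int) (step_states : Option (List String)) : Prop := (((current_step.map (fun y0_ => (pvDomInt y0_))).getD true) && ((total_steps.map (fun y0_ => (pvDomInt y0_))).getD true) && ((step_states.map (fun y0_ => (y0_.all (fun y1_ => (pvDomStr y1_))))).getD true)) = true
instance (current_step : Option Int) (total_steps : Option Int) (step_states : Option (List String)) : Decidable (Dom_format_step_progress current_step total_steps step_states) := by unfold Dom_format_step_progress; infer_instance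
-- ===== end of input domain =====

-- B simplifies A's fallback: a closed-form count-built indicator list replaces the per-index comparison loop ("simpler"; same cost); return values proved equal on the whole domain.

-- ===== PORT A =====
def STEP_INDICATORS : PySem.Dict String String :=
  PySem.Dict.ofList [("completed", "✅"), ("in_progress", "🔄"), ("pending", "⏳"), ("failed", "❌")]

-- A's fallback loop: for i in range(1, total_steps+1). STEP_INDICATORS["k"] is total here
-- (the keys are literal and present), ported as (get? "k").getD "".
def pvFallbackA (c t : Int) : List String :=
  (PySem.List.pyRange 1 (t + 1) 1).foldl
    (fun acc i =>
      acc ++ [if i < c then (STEP_INDICATORS.get? "completed").getD ""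
              else if i = c then (STEP_INDICATORS.get? "in_progress").getD ""
              else (STEP_INDICATORS.get? "pending").getD ""]) []

def format_step_progress (current_step : Option Int) (total_steps : Option Int) (step_states : Option (List String)) : Option String :=
  match current_step, total_steps with
  | none, _ => none
  | _, none => none
  | some c, some t =>
    if t = 0 then none
    else
      let indicators : List String :=
        match step_states with
        | some states =>
          if states.isEmpty then pvFallbackA c t  -- `if step_states:` — empty list falls through
          else states.foldl (fun acc state => acc ++ [STEP_INDICATORS.getD state "⏳"]) []
        | none => pvFallbackA c t
      some ("[Step " ++ PySem.Int.toStr c ++ "/" ++ PySem.Int.toStr t ++ ": " ++ PySem.Str.join "" indicators ++ "]")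

-- ===== PORT B =====
-- closed-form indicator list from counts (Source B's fallback branch)
def pvClosedB (c t : Int) : List String :=
  let completed : Int := max 0 (min (c - 1) t)
  let current : Bool := decide (1 ≤ c ∧ c ≤ t)
  let pending : Int := t - completed - (if current then 1 else 0)
  PySem.List.pyRepeat ["✅"] completed
    ++ (if current then ["🔄"] else [])
    ++ PySem.List.pyRepeat ["⏳"] pending

def format_step_progress_alt (current_step : Option Int) (total_steps : Option Int) (step_states : Option (List String)) : Option String :=
  match current_step, total_steps with
  | none, _ => none
  | _, none => none
  | some c, some t =>
    if t = 0 then none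
    else
      let indicators : List String :=
        match step_states with
        | some states =>
          if states.isEmpty then pvClosedB c t
          else states.map (fun state => STEP_INDICATORS.getD state "⏳")
        | none => pvClosedB c t
      some ("[Step " ++ PySem.Int.toStr c ++ "/" ++ PySem.Int.toStr t ++ ": " ++ PySem.Str.join "" indicators ++ "]")

-- ===== PRECONDITION & SPEC =====
def Spec_format_step_progress (current_step : Option Int) (total_steps : Option Int) (step_states : Option (List String)) (out : Option String) : Prop := out = format_step_progress_alt current_step total_steps step_states
instance (current_step : Option Int) (total_steps : Option Int) (step_states : Option (List String)) (out : Option String) : Decidable (Spec_format_step_progress current_step total_steps step_states out) := by unfold Spec_format_step_progress; infer_instance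

-- ===== CLAIM (what is proved, stated in full; the proofs are below) =====
def Claim_equal_format_step_progress : Prop := ∀ (current_step : Option Int) (total_steps : Option Int) (step_states : Option (List String)), Dom_format_step_progress current_step total_steps step_states → Spec_format_step_progress current_step total_steps step_states (format_step_progress current_step total_steps step_states)

-- ===== LEMMAS AND PROOFS =====

lemma pvMapConst (f : Int → String) (v : String) (a b : Int)
    (h : ∀ i : Int, a ≤ i → i < b → f i = v) :
    (PySem.List.pyRange a b 1).map f = List.replicate (b - a).toNat v := by
  rw [List.eq_replicate_iff]
  constructor
  · simp [PySem.List.length_pyRange_one]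
  · intro x hx
    rcases List.mem_map.mp hx with ⟨i, hi, rfl⟩
    rcases (PySem.List.mem_pyRange_one).mp hi with ⟨h1, h2⟩
    exact h i h1 h2

lemma pvFallback_eq (c t : Int) : pvFallbackA c t = pvClosedB c t := by
  unfold pvFallbackA pvClosedB
  rw [PySem.List.foldl_append_singleton_eq_map]
  simp only [List.nil_append, PySem.List.pyRepeat_singleton, STEP_INDICATORS]
  by_cases hflag : 1 ≤ c ∧ c ≤ t
  · simp only [hflag]
    rw [PySem.List.pyRange_one_append 1 c (t + 1) (by omega) (by omega),
        PySem.List.pyRange_one_append c (c + 1) (t + 1) (by omega) (by omega),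
        PySem.List.pyRange_one_singleton]
    simp only [List.map_append]
    rw [pvMapConst _ "✅" 1 c (by intro i h1 h2; simp [show i < c by omega]; decide),
        pvMapConst _ "⏳" (c + 1) (t + 1)
          (by intro i h1 h2; simp [show ¬ i < c by omega, show ¬ i = c by omega]; decide)]
    have e1 : max 0 (min (c - 1) t) = c - 1 := by omega
    have e2 : (t + 1 - (c + 1)).toNat = (t - (c - 1) - 1).toNat := by omega
    simp [e1]
    exact ⟨by decide, by omega⟩
  · simp only [hflag, decide_false]
    by_cases ht : t ≤ 0
    · rw [PySem.List.pyRange_one_eq_nil (by omega)]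
      have e1 : (max 0 (min (c - 1) t)).toNat = 0 := by omega
      simp [e1]
      omega
    · by_cases hc : c ≤ 0
      · rw [pvMapConst _ "⏳" 1 (t + 1)
            (by intro i h1 h2; simp [show ¬ i < c by omega, show ¬ i = c by omega]; decide)]
        have e1 : (max 0 (min (c - 1) t)).toNat = 0 := by omega
        have e2 : t - max 0 (min (c - 1) t) - 0 = t + 1 - 1 := by omega
        simp [e1, e2]
      · have hct : t + 1 ≤ c := by omega
        rw [pvMapConst _ "✅" 1 (t + 1) (by intro i h1 h2; simp [show i < c by omega]; decide)]
        have e1 : max 0 (min (c - 1) t) = t := by omega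
        simp [e1]

-- ===== VERDICT (by name: the statement is the Claim_ definition above) =====
theorem format_step_progress_spec : Claim_equal_format_step_progress := by
  intro current_step total_steps step_states _hdom
  unfold Spec_format_step_progress format_step_progress format_step_progress_alt
  rcases current_step with _ | c <;> rcases total_steps with _ | t <;> try rfl
  by_cases ht : t = 0
  · simp [ht]
  · simp only [ht, if_false]
    rcases step_states with _ | states
    · simp [pvFallback_eq]
    · by_cases he : states.isEmpty
      · simp [he, pvFallback_eq]
      · simp [he]
        congr 1
        rw [← List.flatMap_def, ← List.map_eq_flatMap]
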